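-- pv_equiv track=rewrite | github.com/Poorna-Vaishnavi/closest_minmax | closest_minmax.py | smallest_subarray_size
-- ===== SOURCE A (Python) =====
-- def smallest_subarray_size(A):
--     max_val = max(A)
--     min_val = min(A)
--     min_max_indices = []
--
--     for i in range(len(A)):
--         if A[i] == max_val or A[i] == min_val:
--             min_max_indices.append(i)
--
--     return min_max_indices[-1] - min_max_indices[0] + 1
-- ===== SOURCE B (Python) =====
-- def smallest_subarray_size(A):
--     lo = min(A)
--     hi = max(A)
--     i = 0
--     while lo < A[i] < hi:
--         i += 1
--     j = len(A) - 1
--     while lo < A[j] < hi: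
--         j -= 1
--     return j - i + 1
-- ===== Notes on version B (the rewrite author's own statement) =====
-- stated objective: simpler
-- what changed: A scans the whole array collecting every min/max index into a list and subtracts its ends; B never builds any index list: it trims with two pointers, walking i forward while elements are strictly between min and max and j backward likewise, and returns j - i + 1; correct because the walks stop exactly at the first and last extreme occurrence, which always exist.
import Mathlib
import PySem

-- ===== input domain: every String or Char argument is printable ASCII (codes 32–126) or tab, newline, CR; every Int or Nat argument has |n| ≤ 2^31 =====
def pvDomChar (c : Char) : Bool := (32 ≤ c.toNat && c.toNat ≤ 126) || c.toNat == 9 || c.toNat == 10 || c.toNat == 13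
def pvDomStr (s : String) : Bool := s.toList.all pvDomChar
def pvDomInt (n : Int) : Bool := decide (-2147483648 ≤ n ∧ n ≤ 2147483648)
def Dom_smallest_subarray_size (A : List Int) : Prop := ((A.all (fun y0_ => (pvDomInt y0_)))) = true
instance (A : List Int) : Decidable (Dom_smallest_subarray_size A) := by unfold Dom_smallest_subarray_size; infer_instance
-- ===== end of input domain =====

-- B replaces A's full scan that collects every extreme index into a list with a
-- two-pointer trim: walk i forward and j backward past elements strictly between
-- min and max, return j - i + 1; objective: simpler (no index list is built).

-- ===== PORT A =====
def smallest_subarray_size (A : List Int) : Int :=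
  match PySem.List.max? A (fun x => x), PySem.List.min? A (fun x => x) with
  | some max_val, some min_val =>
      let min_max_indices : List Int :=
        (PySem.List.pyRange 0 (A.length : Int) 1).foldl
          (fun acc i =>
            if PySem.List.pyGetD A i 0 == max_val || PySem.List.pyGetD A i 0 == min_val
            then acc ++ [i] else acc) []
      PySem.List.pyGetD min_max_indices (-1) 0 - PySem.List.pyGetD min_max_indices 0 0 + 1
  | _, _ => 0

-- ===== PORT B =====
-- Python's forward while-loop `while lo < A[i] < hi: i += 1`: walk the list from
-- the left, advancing the counter; exact while an extreme element exists ahead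
-- (always the case for nonempty A, since A's own minimum stops the walk).
def pvTrimFwd (lo hi : Int) : List Int → Int → Int
  | [], i => i
  | x :: xs, i => if lo < x ∧ x < hi then pvTrimFwd lo hi xs (i + 1) else i

-- Python's backward while-loop `while lo < A[j] < hi: j -= 1`: the same walk over
-- the reversed list, decrementing the counter.
def pvTrimBwd (lo hi : Int) : List Int → Int → Int
  | [], j => j
  | x :: xs, j => if lo < x ∧ x < hi then pvTrimBwd lo hi xs (j - 1) else j

def smallest_subarray_size_alt (A : List Int) : Int :=
  match PySem.List.min? A (fun x => x) with
  | none => 0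
  | some lo =>
    match PySem.List.max? A (fun x => x) with
    | none => 0
    | some hi =>
      let i := pvTrimFwd lo hi A 0
      let j := pvTrimBwd lo hi A.reverse ((A.length : Int) - 1)
      j - i + 1

-- ===== PRECONDITION & SPEC =====
-- Pre_ excludes only the empty list, on which Python's min(A) raises ValueError.
def Pre_smallest_subarray_size (A : List Int) : Prop := A ≠ []
instance (A : List Int) : Decidable (Pre_smallest_subarray_size A) := by unfold Pre_smallest_subarray_size; infer_instance
def pvWitness_smallest_subarray_size : List Int := [3, 1, 2, 3, 1]
def Spec_smallest_subarray_size (A : List Int) (out : Int) : Prop := out = smallest_subarray_size_alt A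
instance (A : List Int) (out : Int) : Decidable (Spec_smallest_subarray_size A out) := by unfold Spec_smallest_subarray_size; infer_instance

-- ===== CLAIM (what is proved, stated in full; the proofs are below) =====
def Claim_equal_smallest_subarray_size : Prop := ∀ (A : List Int), Dom_smallest_subarray_size A → Pre_smallest_subarray_size A → Spec_smallest_subarray_size A (smallest_subarray_size A)

-- ===== LEMMAS AND PROOFS =====

-- the forward trim only shifts its counter
theorem pvTrimFwd_shift (lo hi : Int) (L : List Int) (c : Int) :
    pvTrimFwd lo hi L c = c + pvTrimFwd lo hi L 0 := by
  induction L generalizing c with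
  | nil => simp [pvTrimFwd]
  | cons x xs ih =>
      by_cases h : lo < x ∧ x < hi
      · simp only [pvTrimFwd, if_pos h]
        rw [ih (c + 1), ih (0 + 1)]
        ring
      · rw [pvTrimFwd, if_neg h, pvTrimFwd, if_neg h]
        ring

-- the backward trim is the forward trim subtracted from its counter
theorem pvTrimBwd_eq (lo hi : Int) (L : List Int) (c : Int) :
    pvTrimBwd lo hi L c = c - pvTrimFwd lo hi L 0 := by
  induction L generalizing c with
  | nil => simp [pvTrimBwd, pvTrimFwd]
  | cons x xs ih =>
      by_cases h : lo < x ∧ x < hi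
      · simp only [pvTrimBwd, pvTrimFwd, if_pos h]
        rw [ih (c - 1), pvTrimFwd_shift lo hi xs (0 + 1)]
        ring
      · simp only [pvTrimBwd, pvTrimFwd, if_neg h]
        ring

-- when some element fails the window test, the forward trim stops at the first
-- such element: everything before it passes, position t fails
theorem pvTrimFwd_spec (lo hi : Int) (L : List Int)
    (hx : ∃ x ∈ L, ¬(lo < x ∧ x < hi)) :
    ∃ t : Nat, t < L.length ∧ pvTrimFwd lo hi L 0 = (t : Int) ∧
      ¬(lo < L.getD t 0 ∧ L.getD t 0 < hi) ∧
      ∀ k, k < t → (lo < L.getD k 0 ∧ L.getD k 0 < hi) := by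
  induction L with
  | nil => simp at hx
  | cons x xs ih =>
      by_cases h : lo < x ∧ x < hi
      · have hx' : ∃ y ∈ xs, ¬(lo < y ∧ y < hi) := by
          rcases hx with ⟨y, hy, hyp⟩
          rcases List.mem_cons.mp hy with rfl | hmem
          · exact absurd h hyp
          · exact ⟨y, hmem, hyp⟩
        obtain ⟨t, htl, hte, htf, htp⟩ := ih hx'
        refine ⟨t + 1, by simpa using htl, ?_, by simpa using htf, ?_⟩
        · rw [pvTrimFwd, if_pos h, pvTrimFwd_shift, hte]
          push_cast; ring
        · intro k hk
          cases k with
          | zero => simpa using h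
          | succ k' => simpa using htp k' (by omega)
      · exact ⟨0, by simp, by simp [pvTrimFwd, h], by simpa using h, by omega⟩

-- a strictly increasing list starts with its minimum
theorem head?_pairwise_min {N : List Nat} (hp : N.Pairwise (· < ·)) {k : Nat}
    (hk : k ∈ N) (hmin : ∀ j ∈ N, k ≤ j) : N.head? = some k := by
  cases N with
  | nil => cases hk
  | cons h t =>
      have h1 : k ≤ h := hmin h (by simp)
      rcases List.mem_cons.mp hk with rfl | hkt
      · rfl
      · have := (List.pairwise_cons.mp hp).1 k hkt
        omega

-- a strictly increasing list ends with its maximum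
theorem getLast?_pairwise_max {N : List Nat} (hp : N.Pairwise (· < ·)) {k : Nat}
    (hk : k ∈ N) (hmax : ∀ j ∈ N, j ≤ k) : N.getLast? = some k := by
  induction N with
  | nil => cases hk
  | cons h t ih =>
      cases t with
      | nil => simp at hk ⊢; omega
      | cons h2 t2 =>
          have hk' : k ∈ h2 :: t2 := by
            rcases List.mem_cons.mp hk with rfl | hkt
            · have := (List.pairwise_cons.mp hp).1 h2 (by simp)
              have := hmax h2 (by simp)
              omega
            · exact hkt
          have := ih (List.pairwise_cons.mp hp).2 hk'
            (fun j hj => hmax j (List.mem_cons_of_mem _ hj))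
          simpa [List.getLast?_cons_cons] using this

-- ===== VERDICT (by name: the statement is the Claim_ definition above) =====
theorem smallest_subarray_size_spec : Claim_equal_smallest_subarray_size := by
  intro A _hdom hpre
  unfold Spec_smallest_subarray_size smallest_subarray_size smallest_subarray_size_alt
  have hpre' : A ≠ [] := hpre
  obtain ⟨M, hM⟩ : ∃ M, PySem.List.max? A (fun x => x) = some M := by
    cases h : PySem.List.max? A (fun x => x) with
    | none => exact absurd ((PySem.List.max?_eq_none_iff _ _).mp h) hpre'
    | some M => exact ⟨M, rfl⟩
  obtain ⟨m, hm⟩ : ∃ m, PySem.List.min? A (fun x => x) = some m := by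
    cases h : PySem.List.min? A (fun x => x) with
    | none => exact absurd ((PySem.List.min?_eq_none_iff _ _).mp h) hpre'
    | some m => exact ⟨m, rfl⟩
  have hMmem : M ∈ A := PySem.List.max?_mem hM
  have hmmem : m ∈ A := PySem.List.min?_mem hm
  have hMmax : ∀ y ∈ A, y ≤ M := PySem.List.max?_isMax hM
  have hmmin : ∀ y ∈ A, m ≤ y := PySem.List.min?_isMin hm
  rw [hM, hm]
  dsimp only
  -- B's two trims stop at the first / last extreme position
  obtain ⟨tf, htfl, htfe, htff, htfp⟩ := pvTrimFwd_spec m M A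
    ⟨m, hmmem, fun hc => absurd rfl (ne_of_gt hc.1)⟩
  obtain ⟨tr, htrl, htre, htrf, htrp⟩ := pvTrimFwd_spec m M A.reverse
    ⟨m, List.mem_reverse.mpr hmmem, fun hc => absurd rfl (ne_of_gt hc.1)⟩
  rw [List.length_reverse] at htrl
  rw [htfe, pvTrimBwd_eq, htre]
  -- A's collected list = cast image of N, the increasing list of extreme positions
  rw [PySem.List.foldl_append_if_eq_filter, List.nil_append, PySem.List.pyRange_one]
  simp only [zero_add, sub_zero, Int.toNat_natCast]
  rw [List.filter_map]
  set q : Nat → Bool := fun k => (A.getD k 0 == M || A.getD k 0 == m) with hq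
  have hfeq : ((fun i : Int => PySem.List.pyGetD A i 0 == M || PySem.List.pyGetD A i 0 == m) ∘ fun k : Nat => (k : Int)) = q := by
    funext k
    simp [q, Function.comp, PySem.List.pyGetD_natCast]
  set N : List Nat := (List.range A.length).filter q with hN
  have hNp : N.Pairwise (fun a b => a < b) := (List.pairwise_lt_range).filter q
  have hmemN : ∀ k : Nat, k ∈ N ↔ k < A.length ∧ (A.getD k 0 = M ∨ A.getD k 0 = m) := by
    intro k
    simp [hN, hq, List.mem_filter, List.mem_range, beq_iff_eq]
  -- failing the open window test (lo, hi) means being an extreme value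
  have hwin : ∀ k, k < A.length → ¬(m < A.getD k 0 ∧ A.getD k 0 < M) →
      (A.getD k 0 = M ∨ A.getD k 0 = m) := by
    intro k hk hf
    rw [List.getD_eq_getElem _ _ hk] at hf ⊢
    have h1 := hMmax _ (A.getElem_mem hk)
    have h2 := hmmin _ (A.getElem_mem hk)
    omega
  have hrevget : ∀ (p : Nat) (hp : p < A.length),
      A.reverse[p]'(by simpa using hp) = A[A.length - 1 - p]'(by omega) := by
    intro p hp
    rw [List.getElem_reverse]
  set kfirst := tf with hkf
  set klast := A.length - 1 - tr with hkl
  have hg : A.reverse.getD tr 0 = A.getD klast 0 := by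
    rw [List.getD_eq_getElem _ _ (by simpa using htrl),
        List.getD_eq_getElem _ _ (by omega : klast < A.length), hrevget tr htrl]
  rw [hg] at htrf
  have hkfN : kfirst ∈ N := (hmemN _).mpr ⟨htfl, hwin _ htfl htff⟩
  have hkfmin : ∀ j ∈ N, kfirst ≤ j := by
    intro j hj
    obtain ⟨hjlt, hjv⟩ := (hmemN _).mp hj
    by_contra hc
    have hp := htfp j (by omega)
    rw [List.getD_eq_getElem _ _ hjlt] at hjv hp
    have h1 := hMmax _ (A.getElem_mem hjlt)
    have h2 := hmmin _ (A.getElem_mem hjlt)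
    omega
  have hklN : klast ∈ N := (hmemN _).mpr ⟨by omega, hwin _ (by omega) htrf⟩
  have hklmax : ∀ j ∈ N, j ≤ klast := by
    intro j hj
    obtain ⟨hjlt, hjv⟩ := (hmemN _).mp hj
    by_contra hc
    have hplt : A.length - 1 - j < tr := by omega
    have hp := htrp (A.length - 1 - j) hplt
    have hg : A.reverse.getD (A.length - 1 - j) 0 = A.getD j 0 := by
      rw [List.getD_eq_getElem _ _ (by simpa using (by omega : A.length - 1 - j < A.length)),
          List.getD_eq_getElem _ _ hjlt, hrevget _ (by omega)]
      congr 1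
      omega
    rw [hg, List.getD_eq_getElem _ _ hjlt] at hp
    rw [List.getD_eq_getElem _ _ hjlt] at hjv
    omega
  have hhead : N.head? = some kfirst := head?_pairwise_min hNp hkfN hkfmin
  have hlastN : N.getLast? = some klast := getLast?_pairwise_max hNp hklN hklmax
  -- reduce A's two end accesses
  rw [hfeq, ← hN]
  set L : List Int := N.map (fun k : Nat => (k : Int)) with hL
  have hLne : L ≠ [] := by
    intro h
    rw [hL] at h
    rcases List.map_eq_nil_iff.mp h with h'
    rw [h'] at hkfN
    cases hkfN
  have hLlast : L.getLast? = some (klast : Int) := by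
    rw [hL, List.getLast?_map, hlastN]; rfl
  have hLhead : L.head? = some (kfirst : Int) := by
    rw [hL, List.head?_map, hhead]; rfl
  rw [PySem.List.pyGetD_neg_one _ _ hLne, PySem.List.pyGetD_zero]
  have h1 : L.getLast hLne = (klast : Int) := by
    have := List.getLast?_eq_some_getLast (l := L) (h := hLne)
    rw [this] at hLlast
    exact Option.some.inj hLlast
  have h2 : L.getD 0 0 = (kfirst : Int) := by
    cases hLc : L with
    | nil => exact absurd hLc hLne
    | cons x t =>
        rw [hLc] at hLhead
        simp at hLhead
        simp [hLhead]
  rw [h1, h2]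
  have hn1 : 1 ≤ A.length := List.length_pos_of_ne_nil hpre'
  omega
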